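-- pv_equiv track=rewrite | github.com/ChiaN-Yang/QMeas | QMeas/experiment/backtracking.py | linspacer_iterator
-- ===== SOURCE A (Python) =====
-- def linspacer_iterator(digits):
--     res = []
--
--     def backtrack(i):
--         if i == len(digits):
--             return
--         for c in digits[i]:
--             res.append(c)
--             backtrack(i+1)
--
--     backtrack(0)
--     return res
-- ===== SOURCE B (Python) =====
-- def linspacer_iterator(digits):
--     # Build the flat traversal bottom-up: the suffix emitted after each choice
--     # at level i is the same, so compute it once per level.
--     tail = []
--     for i in range(len(digits) - 1, -1, -1):
--         newtail = []
--         for c in digits[i]: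
--             newtail.append(c)
--             newtail.extend(tail)
--         tail = newtail
--     return tail
-- ===== Notes on version B (the rewrite author's own statement) =====
-- stated objective: faster
-- what changed: Replaces the forward backtracking recursion over one shared accumulator with an iterative bottom-up pass that builds each level's shared suffix once and splices it after every choice at that level.
import Mathlib
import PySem

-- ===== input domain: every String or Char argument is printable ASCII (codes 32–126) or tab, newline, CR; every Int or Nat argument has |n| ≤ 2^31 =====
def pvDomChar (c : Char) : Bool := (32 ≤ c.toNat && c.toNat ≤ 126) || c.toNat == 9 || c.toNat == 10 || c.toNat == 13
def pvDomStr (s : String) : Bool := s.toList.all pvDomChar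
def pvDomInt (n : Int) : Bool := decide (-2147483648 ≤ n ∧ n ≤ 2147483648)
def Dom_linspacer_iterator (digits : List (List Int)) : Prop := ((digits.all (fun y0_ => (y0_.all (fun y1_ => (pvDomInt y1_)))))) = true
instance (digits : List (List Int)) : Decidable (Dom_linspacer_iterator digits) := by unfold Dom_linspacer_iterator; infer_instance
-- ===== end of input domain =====

-- B replaces A's forward backtracking recursion with an iterative bottom-up
-- pass that computes each level's shared suffix once (alternative decomposition).

-- ===== PORT A =====
-- backtrack(i): recursion over the suffix of `digits` from index i, threading
-- the shared accumulator `res` (each append becomes `res ++ [c]`).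
def pvBacktrack (rest : List (List Int)) (res : List Int) : List Int :=
  match rest with
  | [] => res
  | d :: ds => d.foldl (fun r c => pvBacktrack ds (r ++ [c])) res

def linspacer_iterator (digits : List (List Int)) : List Int :=
  pvBacktrack digits []

-- ===== PORT B =====
-- tail = []; for i from len-1 down to 0 (= foldr over digits):
--   newtail = []; for c in digits[i]: newtail.append(c); newtail.extend(tail)
def linspacer_iterator_alt (digits : List (List Int)) : List Int :=
  digits.foldr (fun d tail => d.foldl (fun nt c => nt ++ [c] ++ tail) []) []

-- ===== PRECONDITION & SPEC =====
def Spec_linspacer_iterator (digits : List (List Int)) (out : List Int) : Prop := out = linspacer_iterator_alt digits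
instance (digits : List (List Int)) (out : List Int) : Decidable (Spec_linspacer_iterator digits out) := by unfold Spec_linspacer_iterator; infer_instance

-- ===== CLAIM (what is proved, stated in full; the proofs are below) =====
def Claim_equal_linspacer_iterator : Prop := ∀ (digits : List (List Int)), Dom_linspacer_iterator digits → Spec_linspacer_iterator digits (linspacer_iterator digits)

-- ===== LEMMAS AND PROOFS =====

-- B's inner loop pulled out: the suffix appended per level.
theorem pvLevel_acc (d : List Int) (tail nt : List Int) :
    d.foldl (fun nt c => nt ++ [c] ++ tail) nt
      = nt ++ d.foldl (fun nt c => nt ++ [c] ++ tail) [] := by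
  induction d generalizing nt with
  | nil => simp
  | cons c cs ih =>
    simp only [List.foldl_cons]
    rw [ih (nt ++ [c] ++ tail), ih ([] ++ [c] ++ tail)]
    simp

-- A's recursion equals "accumulator ++ B's value on the remaining levels".
theorem pvBacktrack_eq (rest : List (List Int)) (res : List Int) :
    pvBacktrack rest res
      = res ++ rest.foldr (fun d tail => d.foldl (fun nt c => nt ++ [c] ++ tail) []) [] := by
  induction rest generalizing res with
  | nil => simp [pvBacktrack]
  | cons d ds ih =>
    simp only [pvBacktrack, List.foldr_cons]
    induction d generalizing res with
    | nil => simp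
    | cons c cs ihd =>
      simp only [List.foldl_cons]
      rw [ihd (pvBacktrack ds (res ++ [c])), ih (res ++ [c])]
      conv_rhs => rw [pvLevel_acc]
      simp

-- ===== VERDICT (by name: the statement is the Claim_ definition above) =====
theorem linspacer_iterator_spec : Claim_equal_linspacer_iterator := by
  intro digits _
  unfold Spec_linspacer_iterator linspacer_iterator linspacer_iterator_alt
  simpa using pvBacktrack_eq digits []
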